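-- pv_equiv track=rewrite | github.com/sumedhpendurkar/AMF-VQA | DatasetCreation.py | wholeDict
-- ===== SOURCE A (Python) =====
-- def wholeDict(csv_reader):
--     global_dict = {}
--     for row in csv_reader:
--         if row[0] in global_dict:
--             global_dict[row[0]]["ques"].append(row[1])
--             global_dict[row[0]]["ans"].append(row[2])
--         else:
--             global_dict[row[0]] = {}
--             global_dict[row[0]]["ques"] = []
--             global_dict[row[0]]["ques"].append(row[1])
--             global_dict[row[0]]["ans"] = []
--             global_dict[row[0]]["ans"].append(row[2])
--     return global_dict
-- ===== SOURCE B (Python) =====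
-- def wholeDict(csv_reader):
--     # Two-pass grouping: collect the distinct keys in first-appearance order,
--     # then build each group with per-key comprehensions over the rows.
--     rows = list(csv_reader)
--     keys = []
--     for row in rows:
--         if row[0] not in keys:
--             keys.append(row[0])
--     return {k: {"ques": [row[1] for row in rows if row[0] == k],
--                 "ans": [row[2] for row in rows if row[0] == k]}
--             for k in keys}
-- ===== Notes on version B (the rewrite author's own statement) =====
-- stated objective: alternative
-- what changed: Replaces the incremental dict-mutation grouping (membership test + in-place appends per row) by a two-pass strategy: first collect the distinct keys in first-appearance order, then build each group's ques/ans lists with per-key comprehensions over the rows.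
import Mathlib
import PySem

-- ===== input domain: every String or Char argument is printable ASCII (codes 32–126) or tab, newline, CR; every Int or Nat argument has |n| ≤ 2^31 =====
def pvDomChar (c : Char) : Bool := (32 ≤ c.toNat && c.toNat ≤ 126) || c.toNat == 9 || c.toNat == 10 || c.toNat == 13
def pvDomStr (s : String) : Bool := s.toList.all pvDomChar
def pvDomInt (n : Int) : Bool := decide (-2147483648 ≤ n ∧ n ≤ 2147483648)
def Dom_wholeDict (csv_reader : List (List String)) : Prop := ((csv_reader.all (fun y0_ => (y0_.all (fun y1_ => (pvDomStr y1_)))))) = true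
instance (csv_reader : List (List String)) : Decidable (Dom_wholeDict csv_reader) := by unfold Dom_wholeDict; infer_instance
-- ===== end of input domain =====

-- B replaces A's incremental dict-mutation grouping by a two-pass strategy (distinct keys
-- first, then per-key comprehensions); structurally different, not faster (O(k*n) vs O(n)).

-- ===== PORT A =====
-- one loop iteration of A: membership test on the outer dict, then in-place appends /
-- fresh inner-dict construction (each Python statement is one Dict operation)
def wholeDictStep (d : PySem.Dict String (PySem.Dict String (List String)))
    (row : List String) : PySem.Dict String (PySem.Dict String (List String)) :=
  let k := PySem.List.pyGetD row 0 ""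
  let q := PySem.List.pyGetD row 1 ""
  let a := PySem.List.pyGetD row 2 ""
  if d.contains k then
    -- global_dict[row[0]]["ques"].append(row[1]); global_dict[row[0]]["ans"].append(row[2])
    d.modify k PySem.Dict.empty
      (fun inner => (inner.modify "ques" [] (· ++ [q])).modify "ans" [] (· ++ [a]))
  else
    -- global_dict[row[0]] = {}; ["ques"] = []; .append; ["ans"] = []; .append
    let i0 : PySem.Dict String (List String) := PySem.Dict.empty
    let i1 := i0.insert "ques" []
    let i2 := i1.modify "ques" [] (· ++ [q])
    let i3 := i2.insert "ans" []
    let i4 := i3.modify "ans" [] (· ++ [a])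
    d.insert k i4

def wholeDict (csv_reader : List (List String)) : List (String × List (String × List String)) :=
  let global_dict := csv_reader.foldl wholeDictStep PySem.Dict.empty
  (global_dict.items.map (fun p => (p.1, p.2.items)))

-- ===== PORT B =====
def wholeDict_alt (csv_reader : List (List String)) : List (String × List (String × List String)) :=
  let rows := csv_reader
  let keys := rows.foldl
    (fun ks row => if ks.contains (PySem.List.pyGetD row 0 "") then ks
                   else ks ++ [PySem.List.pyGetD row 0 ""]) ([] : List String)
  keys.map (fun k =>
    (k, [("ques", (rows.filter (fun row => PySem.List.pyGetD row 0 "" == k)).map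
                    (fun row => PySem.List.pyGetD row 1 "")),
         ("ans", (rows.filter (fun row => PySem.List.pyGetD row 0 "" == k)).map
                    (fun row => PySem.List.pyGetD row 2 ""))]))

-- ===== PRECONDITION & SPEC =====
-- Pre_ excludes exactly the inputs where Python raises IndexError: a row with fewer
-- than 3 fields (A reads row[0], row[1], row[2] on every row; B reads the same fields).
def Pre_wholeDict (csv_reader : List (List String)) : Prop :=
  ∀ row ∈ csv_reader, 3 ≤ row.length
instance (csv_reader : List (List String)) : Decidable (Pre_wholeDict csv_reader) := by
  unfold Pre_wholeDict; infer_instance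
def pvWitness_wholeDict : List (List String) := [["a", "q1", "x"], ["a", "q2", "y"], ["b", "q3", "z"]]

def Spec_wholeDict (csv_reader : List (List String)) (out : List (String × List (String × List String))) : Prop := out = wholeDict_alt csv_reader
instance (csv_reader : List (List String)) (out : List (String × List (String × List String))) : Decidable (Spec_wholeDict csv_reader out) := by unfold Spec_wholeDict; infer_instance

-- ===== CLAIM (what is proved, stated in full; the proofs are below) =====
def Claim_equal_wholeDict : Prop := ∀ (csv_reader : List (List String)), Dom_wholeDict csv_reader → Pre_wholeDict csv_reader → Spec_wholeDict csv_reader (wholeDict csv_reader)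

-- ===== LEMMAS AND PROOFS =====

-- proof-side abbreviations: the row key and the two per-key projections
def pvKey (r : List String) : String := PySem.List.pyGetD r 0 ""
def pvQues (rows : List (List String)) (k : String) : List String :=
  (rows.filter (fun r => pvKey r == k)).map (fun r => PySem.List.pyGetD r 1 "")
def pvAns (rows : List (List String)) (k : String) : List String :=
  (rows.filter (fun r => pvKey r == k)).map (fun r => PySem.List.pyGetD r 2 "")
def pvInner (rows : List (List String)) (k : String) : PySem.Dict String (List String) :=
  PySem.Dict.mk [("ques", pvQues rows k), ("ans", pvAns rows k)]

-- A's loop invariant: after folding the rows, the outer dict is the canonical grouped form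
lemma foldA_eq (rows : List (List String)) :
    rows.foldl wholeDictStep PySem.Dict.empty =
      PySem.Dict.mk ((PySem.Set.ofList (rows.map pvKey)).map (fun k => (k, pvInner rows k))) := by
  induction rows using List.reverseRecOn with
  | nil => rfl
  | append_singleton rows r ih =>
    rw [List.foldl_append, List.foldl_cons, List.foldl_nil, ih, List.map_append, List.map_cons,
      List.map_nil,
      show PySem.Set.ofList (rows.map pvKey ++ [pvKey r])
          = PySem.Set.add (PySem.Set.ofList (rows.map pvKey)) (pvKey r) by
        simp only [PySem.Set.ofList_eq_foldl, List.foldl_append, List.foldl_cons, List.foldl_nil]]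
    set ks := PySem.Set.ofList (rows.map pvKey) with hks
    have hnd : ks.Nodup := PySem.Set.nodup_ofList _
    have hkeys : (PySem.Dict.mk (ks.map fun k => (k, pvInner rows k))).keys = ks := by
      simp [PySem.Dict.keys, Function.comp_def]
    have hc : (PySem.Dict.mk (ks.map fun k => (k, pvInner rows k))).contains (pvKey r)
        = decide (pvKey r ∈ ks) := by
      rw [PySem.Dict.contains_eq_decide_mem_keys, hkeys]
    unfold wholeDictStep
    simp only [show (PySem.List.pyGetD r 0 "") = pvKey r from rfl]
    by_cases h : pvKey r ∈ ks
    · have hct : (PySem.Dict.mk (ks.map fun k => (k, pvInner rows k))).contains (pvKey r) = true := by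
        rw [hc]; exact decide_eq_true h
      rw [if_pos hct]
      rw [show PySem.Set.add ks (pvKey r) = ks by simp [PySem.Set.add, PySem.Set.contains, h]]
      have hget : (PySem.Dict.mk (ks.map fun k => (k, pvInner rows k))).getD (pvKey r)
          PySem.Dict.empty = pvInner rows (pvKey r) :=
        PySem.Dict.getD_of_mem_items _
          (show (pvKey r, pvInner rows (pvKey r)) ∈ ks.map (fun k => (k, pvInner rows k)) from
            List.mem_map_of_mem h) (by rw [hkeys]; exact hnd) _
      rw [show ∀ (d : PySem.Dict String (PySem.Dict String (List String))) k g,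
            d.modify k PySem.Dict.empty g = d.insert k (g (d.getD k PySem.Dict.empty))
          from fun _ _ _ => rfl, hget]
      apply PySem.Dict.ext
      rw [PySem.Dict.items_insert_of_contains _ _ hct]
      show (ks.map _).map _ = ks.map _
      rw [List.map_map]
      apply List.map_congr_left
      intro k' hk'
      by_cases he : k' = pvKey r
      · subst he
        simp only [Function.comp, beq_self_eq_true, if_pos]
        show (pvKey r, ((pvInner rows (pvKey r)).modify "ques" [] (· ++ [PySem.List.pyGetD r 1 ""])).modify "ans" [] (· ++ [PySem.List.pyGetD r 2 ""])) = _
        rw [show ((pvInner rows (pvKey r)).modify "ques" [] (· ++ [PySem.List.pyGetD r 1 ""])).modify "ans" [] (· ++ [PySem.List.pyGetD r 2 ""])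
            = PySem.Dict.mk [("ques", pvQues rows (pvKey r) ++ [PySem.List.pyGetD r 1 ""]),
                             ("ans", pvAns rows (pvKey r) ++ [PySem.List.pyGetD r 2 ""])] from rfl]
        unfold pvInner pvQues pvAns
        simp only [List.filter_append, List.filter_cons, List.filter_nil, beq_self_eq_true,
          if_true, List.map_append, List.map_cons, List.map_nil]
      · simp only [Function.comp]
        rw [if_neg (by simpa using he)]
        unfold pvInner pvQues pvAns
        have hb : (pvKey r == k') = false := by simpa using Ne.symm he
        simp only [List.filter_append, List.filter_cons, List.filter_nil, hb, Bool.false_eq_true,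
          if_false, List.append_nil]
    · have hcf : (PySem.Dict.mk (ks.map fun k => (k, pvInner rows k))).contains (pvKey r) = false := by
        rw [hc]; exact decide_eq_false h
      rw [if_neg (by rw [hcf]; exact Bool.false_ne_true)]
      rw [show PySem.Set.add ks (pvKey r) = ks ++ [pvKey r] by
        simp [PySem.Set.add, PySem.Set.contains, h]]
      apply PySem.Dict.ext
      rw [show (PySem.Dict.items (PySem.Dict.mk ((ks ++ [pvKey r]).map fun k => (k, pvInner (rows ++ [r]) k))))
          = (ks ++ [pvKey r]).map (fun k => (k, pvInner (rows ++ [r]) k)) from rfl]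
      rw [PySem.Dict.items_insert_of_not_contains _ _ hcf]
      rw [List.map_append]
      have hnr : pvKey r ∉ rows.map pvKey := by
        intro hm; exact h ((PySem.Set.mem_ofList _ _).2 hm)
      congr 1
      · show ks.map _ = ks.map _
        apply List.map_congr_left
        intro k' hk'
        have hne : pvKey r ≠ k' := fun he => h (he ▸ hk')
        have hb : (pvKey r == k') = false := by simpa using hne
        unfold pvInner pvQues pvAns
        simp only [List.filter_append, List.filter_cons, List.filter_nil, hb, Bool.false_eq_true,
          if_false, List.append_nil]
      · have hfil : rows.filter (fun r' => pvKey r' == pvKey r) = [] := by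
          rw [List.filter_eq_nil_iff]
          intro r' hr'
          simp only [beq_iff_eq]
          intro he
          exact hnr (he ▸ List.mem_map_of_mem hr')
        have hinner : pvInner (rows ++ [r]) (pvKey r)
            = PySem.Dict.mk [("ques", [PySem.List.pyGetD r 1 ""]), ("ans", [PySem.List.pyGetD r 2 ""])] := by
          unfold pvInner pvQues pvAns
          simp only [List.filter_append, hfil, List.filter_cons, List.filter_nil, beq_self_eq_true,
            if_true, List.map_cons, List.map_nil, List.nil_append]
        simp only [List.map_cons, List.map_nil, hinner]
        rfl

-- B's key-collection loop is set(first occurrences) of the row keys, in order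
lemma keysB_eq (rows : List (List String)) :
    rows.foldl (fun ks row => if ks.contains (PySem.List.pyGetD row 0 "") then ks
                   else ks ++ [PySem.List.pyGetD row 0 ""]) ([] : List String)
      = PySem.Set.ofList (rows.map pvKey) := by
  simp only [PySem.Set.ofList_eq_foldl, List.foldl_map]; rfl

lemma wholeDict_eq_canon (rows : List (List String)) :
    wholeDict rows = (PySem.Set.ofList (rows.map pvKey)).map
      (fun k => (k, [("ques", pvQues rows k), ("ans", pvAns rows k)])) := by
  show ((rows.foldl wholeDictStep PySem.Dict.empty).items.map (fun p => (p.1, p.2.items))) = _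
  rw [foldA_eq]
  show ((PySem.Set.ofList (rows.map pvKey)).map (fun k => (k, pvInner rows k))).map
      (fun p => (p.1, p.2.items)) = _
  rw [List.map_map]
  rfl

lemma wholeDict_alt_eq_canon (rows : List (List String)) :
    wholeDict_alt rows = (PySem.Set.ofList (rows.map pvKey)).map
      (fun k => (k, [("ques", pvQues rows k), ("ans", pvAns rows k)])) := by
  show (rows.foldl (fun ks row => if ks.contains (PySem.List.pyGetD row 0 "") then ks
          else ks ++ [PySem.List.pyGetD row 0 ""]) ([] : List String)).map _ = _
  rw [keysB_eq]
  rfl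

-- ===== VERDICT (by name: the statement is the Claim_ definition above) =====
theorem wholeDict_spec : Claim_equal_wholeDict := by
  intro rows _ _
  unfold Spec_wholeDict
  rw [wholeDict_eq_canon, wholeDict_alt_eq_canon]
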